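-- pv_equiv track=rewrite | github.com/Sharjeelbaig/neurocoder | infer/validators.py | build_check
-- ===== SOURCE A (Python) =====
-- def _balanced_symbols(text: str) -> bool:
--     pairs = {")": "(", "}": "{", "]": "["}
--     stack: list[str] = []
--     for char in text:
--         if char in "({[":
--             stack.append(char)
--             continue
--         if char in pairs:
--             if not stack or stack[-1] != pairs[char]:
--                 return False
--             stack.pop()
--     return not stack
--
-- def build_check(files: dict[str, str]) -> tuple[bool, list[str]]:
--     notes: list[str] = []
--     ok = True
--     for path, content in files.items():
--         if path.endswith((".tsx", ".jsx", ".ts", ".js")):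
--             if not _balanced_symbols(content):
--                 ok = False
--                 notes.append(f"{path}: unbalanced symbols")
--             if "BROKEN_BUILD" in content:
--                 ok = False
--                 notes.append(f"{path}: BROKEN_BUILD marker found")
--     return ok, notes
-- ===== SOURCE B (Python) =====
-- def _balanced_symbols(text: str) -> bool:
--     s = "".join(c for c in text if c in "()[]{}")
--     while True:
--         t = s.replace("()", "").replace("[]", "").replace("{}", "")
--         if t == s:
--             break
--         s = t
--     return s == ""
--
-- def _file_notes(path: str, content: str) -> list[str]:
--     if not path.endswith((".tsx", ".jsx", ".ts", ".js")):
--         return []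
--     notes = []
--     if not _balanced_symbols(content):
--         notes.append(f"{path}: unbalanced symbols")
--     if "BROKEN_BUILD" in content:
--         notes.append(f"{path}: BROKEN_BUILD marker found")
--     return notes
--
-- def build_check(files: dict[str, str]) -> tuple[bool, list[str]]:
--     notes = [n for path, content in files.items() for n in _file_notes(path, content)]
--     return not notes, notes
-- ===== Notes on version B (the rewrite author's own statement) =====
-- stated objective: alternative
-- what changed: Bracket balance is decided by a fixpoint string reduction (filter to bracket chars, then repeatedly delete adjacent '()', '[]', '{}' pairs until nothing changes and test for empty) instead of an explicit stack scan, and build_check collects notes with a per-file helper and comprehension and derives ok as 'not notes' instead of a mutating loop with a separate ok flag.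
import Mathlib
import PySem

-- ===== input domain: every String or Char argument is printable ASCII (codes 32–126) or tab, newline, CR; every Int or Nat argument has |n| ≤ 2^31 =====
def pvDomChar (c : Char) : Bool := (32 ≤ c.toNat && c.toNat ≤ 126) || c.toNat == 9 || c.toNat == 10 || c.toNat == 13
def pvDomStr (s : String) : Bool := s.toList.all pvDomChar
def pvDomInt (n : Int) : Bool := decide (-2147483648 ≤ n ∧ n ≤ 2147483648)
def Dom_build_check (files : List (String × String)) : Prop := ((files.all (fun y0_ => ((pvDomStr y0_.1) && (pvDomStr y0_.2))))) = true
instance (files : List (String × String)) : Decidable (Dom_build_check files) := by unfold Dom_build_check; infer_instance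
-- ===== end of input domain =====

-- B replaces A's explicit bracket stack by a fixpoint pair-deletion over the filtered bracket string
-- and collects build_check's notes with a per-file helper (ok = "no notes"): an alternative
-- decomposition of the same function, proved to return the same value on every input.

-- ===== PORT A =====
-- pairs = {")": "(", "}": "{", "]": "["}
def pairsA (c : Char) : Option Char :=
  if c = ')' then some '(' else if c = '}' then some '{' else if c = ']' then some '[' else none

-- the for-loop of _balanced_symbols with its early 'return False' (stack head = Python stack[-1])
def balancedA : List Char → List Char → Bool
  | [], stack => stack.isEmpty
  | c :: t, stack =>
    if c = '(' || c = '{' || c = '[' then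
      balancedA t (c :: stack)
    else
      match pairsA c with
      | some o =>
        match stack with
        | [] => false
        | top :: rest => if top ≠ o then false else balancedA t rest
      | none => balancedA t stack

def balanced_symbols (text : String) : Bool := balancedA text.toList []

def build_check (files : List (String × String)) : Bool × List String :=
  files.foldl (fun (acc : Bool × List String) pc =>
    if PySem.Str.endswith pc.1 ".tsx" || PySem.Str.endswith pc.1 ".jsx" ||
       PySem.Str.endswith pc.1 ".ts" || PySem.Str.endswith pc.1 ".js" then
      let acc1 := if !balanced_symbols pc.2 then (false, acc.2 ++ [pc.1 ++ ": unbalanced symbols"]) else acc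
      if PySem.Str.isIn "BROKEN_BUILD" pc.2 then (false, acc1.2 ++ [pc.1 ++ ": BROKEN_BUILD marker found"]) else acc1
    else acc) (true, [])

-- ===== PORT B =====
def isBracketChar (c : Char) : Bool :=
  c = '(' || c = ')' || c = '[' || c = ']' || c = '{' || c = '}'

-- what PySem.Chars.replace computes for a two-character pattern and empty replacement;
-- needed ABOVE the port only because balancedLoop's decreasing_by cites reduceOnce_length_lt.
def myRep (a b : Char) : List Char → List Char
  | [] => []
  | [c] => [c]
  | c :: d :: t => if c = a ∧ d = b then myRep a b t else c :: myRep a b (d :: t)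

theorem myRep_length_le (a b : Char) (l : List Char) : (myRep a b l).length ≤ l.length := by
  induction l using myRep.induct a b with
  | case1 => simp [myRep]
  | case2 c => simp [myRep]
  | case3 c d t h ih => simp only [myRep, if_pos h]; simp; omega
  | case4 c d t h ih => simp only [myRep, if_neg h]; simpa using ih

theorem myRep_eq_or_length_lt (a b : Char) (l : List Char) :
    myRep a b l = l ∨ (myRep a b l).length < l.length := by
  induction l using myRep.induct a b with
  | case1 => left; rfl
  | case2 c => left; rfl
  | case3 c d t h ih =>
    right; simp only [myRep, if_pos h]
    have := myRep_length_le a b t; simp; omega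
  | case4 c d t h ih =>
    simp only [myRep, if_neg h]
    rcases ih with h1 | h1
    · left; rw [h1]
    · right; simpa using h1

theorem replace_go_eq (a b : Char) :
    ∀ fuel l acc, l.length ≤ fuel →
      PySem.Chars.replace.go [a, b] [] fuel l acc = acc.reverse ++ myRep a b l := by
  intro fuel
  induction fuel with
  | zero =>
    intro l acc h
    have : l = [] := by cases l <;> simp_all
    subst this
    rw [PySem.Chars.replace.go]; simp [myRep]
  | succ n ih =>
    intro l acc h
    match l with
    | [] =>
      rw [PySem.Chars.replace.go]
      · simp [myRep]
      · omega
    | [c] =>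
      rw [PySem.Chars.replace.go]
      have hpre : [a, b].isPrefixOf [c] = false := by simp [List.isPrefixOf]
      simp only [hpre, Bool.false_eq_true, if_false]
      rw [ih [] (c :: acc) (by simp)]
      simp [myRep]
    | c :: d :: t =>
      rw [PySem.Chars.replace.go]
      by_cases hm : c = a ∧ d = b
      · have hpre : [a, b].isPrefixOf (c :: d :: t) = true := by
          rcases hm with ⟨rfl, rfl⟩; simp [List.isPrefixOf]
        simp only [hpre]
        simp only [List.reverse_nil, List.nil_append, List.length_cons, List.length_nil,
          if_true, List.drop_succ_cons, List.drop_zero]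
        rw [ih t acc (by simp at h ⊢; omega)]
        simp [myRep, if_pos hm]
      · have hpre : [a, b].isPrefixOf (c :: d :: t) = false := by
          simp [List.isPrefixOf]
          intro h1 h2
          exact hm ⟨h1.symm, h2.symm⟩
        simp only [hpre, Bool.false_eq_true, if_false]
        rw [ih (d :: t) (c :: acc) (by simp at h ⊢; omega)]
        simp [myRep, if_neg hm]

theorem replace_pair_eq (a b : Char) (l : List Char) :
    PySem.Chars.replace l [a, b] [] = myRep a b l := by
  rw [PySem.Chars.replace]
  simp only [List.isEmpty_cons, Bool.false_eq_true, if_false]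
  rw [replace_go_eq a b l.length l [] (le_refl _)]
  simp

-- one round: s.replace("()","").replace("[]","").replace("{}","")
def reduceOnce (s : String) : String :=
  PySem.Str.replace (PySem.Str.replace (PySem.Str.replace s "()" "") "[]" "") "{}" ""

theorem reduceOnce_toList (s : String) :
    (reduceOnce s).toList = myRep '{' '}' (myRep '[' ']' (myRep '(' ')' s.toList)) := by
  simp [reduceOnce, PySem.Str.toList_replace, replace_pair_eq]

theorem reduceOnce_length_lt (s : String) (h : ¬ reduceOnce s = s) :
    (reduceOnce s).toList.length < s.toList.length := by
  have h1 := myRep_eq_or_length_lt '(' ')' s.toList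
  have h2 := myRep_eq_or_length_lt '[' ']' (myRep '(' ')' s.toList)
  have h3 := myRep_eq_or_length_lt '{' '}' (myRep '[' ']' (myRep '(' ')' s.toList))
  have l1 := myRep_length_le '(' ')' s.toList
  have l2 := myRep_length_le '[' ']' (myRep '(' ')' s.toList)
  have l3 := myRep_length_le '{' '}' (myRep '[' ']' (myRep '(' ')' s.toList))
  rw [reduceOnce_toList]
  rcases h1 with h1 | h1
  · rw [h1] at h2 h3 l2 l3
    rcases h2 with h2 | h2
    · rw [h2] at h3 l3
      rcases h3 with h3 | h3
      · exfalso; apply h; apply String.toList_inj.mp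
        rw [reduceOnce_toList, h1, h2, h3]
      · rw [h1, h2]; exact h3
    · rw [h1]; omega
  · omega

-- the while-loop of B's _balanced_symbols
def balancedLoop (s : String) : Bool :=
  let t := reduceOnce s
  if h : t = s then s == "" else balancedLoop t
  termination_by s.toList.length
  decreasing_by exact reduceOnce_length_lt s h

def balanced_symbols_alt (text : String) : Bool :=
  balancedLoop (String.ofList (text.toList.filter isBracketChar))

def fileNotes (path content : String) : List String :=
  if !(PySem.Str.endswith path ".tsx" || PySem.Str.endswith path ".jsx" ||
       PySem.Str.endswith path ".ts" || PySem.Str.endswith path ".js") then []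
  else
    let notes := if !balanced_symbols_alt content then [path ++ ": unbalanced symbols"] else []
    if PySem.Str.isIn "BROKEN_BUILD" content then notes ++ [path ++ ": BROKEN_BUILD marker found"]
    else notes

def build_check_alt (files : List (String × String)) : Bool × List String :=
  let notes := files.flatMap (fun pc => fileNotes pc.1 pc.2)
  (notes.isEmpty, notes)

-- ===== PRECONDITION & SPEC =====
def Spec_build_check (files : List (String × String)) (out : Bool × List String) : Prop := out = build_check_alt files
instance (files : List (String × String)) (out : Bool × List String) : Decidable (Spec_build_check files out) := by unfold Spec_build_check; infer_instance

-- ===== CLAIM (what is proved, stated in full; the proofs are below) =====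
def Claim_equal_build_check : Prop := ∀ (files : List (String × String)), Dom_build_check files → Spec_build_check files (build_check files)

-- ===== LEMMAS AND PROOFS =====

theorem balancedA_filter (l : List Char) : ∀ st, balancedA (l.filter isBracketChar) st = balancedA l st := by
  induction l with
  | nil => intro st; rfl
  | cons c t ih =>
    intro st
    by_cases hb : isBracketChar c = true
    · rw [List.filter_cons_of_pos hb]
      simp only [balancedA]
      split_ifs with h1
      · exact ih _
      · cases hp : pairsA c with
        | some o =>
          cases st with
          | nil => rfl
          | cons top rest =>
            dsimp only
            split_ifs <;> [rfl; exact ih _]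
        | none => exact ih _
    · rw [List.filter_cons_of_neg (by simpa using hb)]
      obtain ⟨⟨⟨⟨⟨n1, n2⟩, n3⟩, n4⟩, n5⟩, n6⟩ :
          ((((¬c = '(' ∧ ¬c = ')') ∧ ¬c = '[') ∧ ¬c = ']') ∧ ¬c = '{') ∧ ¬c = '}' := by
        simpa [isBracketChar] using hb
      simp only [balancedA, pairsA, n1, n2, n3, n4, n5, n6, if_false]
      simp [ih]

theorem balancedA_cons (c : Char) (t st : List Char) :
    balancedA (c :: t) st =
      if c = '(' || c = '{' || c = '[' then balancedA t (c :: st)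
      else
        match pairsA c with
        | some o =>
          match st with
          | [] => false
          | top :: rest => if top ≠ o then false else balancedA t rest
        | none => balancedA t st := rfl

theorem balancedA_myRep {a b : Char}
    (hp : (a, b) = ('(', ')') ∨ (a, b) = ('[', ']') ∨ (a, b) = ('{', '}')) :
    ∀ (l : List Char) (st : List Char), balancedA (myRep a b l) st = balancedA l st := by
  intro l
  induction l using myRep.induct a b with
  | case1 => intro st; rfl
  | case2 c => intro st; rfl
  | case3 c d t h ih =>
    intro st
    simp only [myRep, if_pos h]
    obtain ⟨rfl, rfl⟩ := h
    rw [ih st]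
    rcases hp with hp | hp | hp <;>
      · obtain ⟨rfl, rfl⟩ := Prod.mk.inj hp
        simp [balancedA, pairsA]
  | case4 c d t h ih =>
    intro st
    simp only [myRep, if_neg h]
    rw [balancedA_cons c (myRep a b (d :: t)) st, balancedA_cons c (d :: t) st]
    split_ifs with h1
    · exact ih _
    · cases hp2 : pairsA c with
      | some o =>
        cases st with
        | nil => rfl
        | cons top rest =>
          dsimp only
          split_ifs <;> [rfl; exact ih _]
      | none => exact ih _

def matchedPair (c d : Char) : Bool :=
  (c = '(' && d = ')') || (c = '[' && d = ']') || (c = '{' && d = '}')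

def noAdj : List Char → Bool
  | [] => true
  | [_] => true
  | c :: d :: t => !matchedPair c d && noAdj (d :: t)

theorem myRep_fix_cons (a b c d : Char) (t : List Char)
    (h : myRep a b (c :: d :: t) = c :: d :: t) :
    ¬(c = a ∧ d = b) ∧ myRep a b (d :: t) = d :: t := by
  by_cases hm : c = a ∧ d = b
  · exfalso
    simp only [myRep, if_pos hm] at h
    have hle := myRep_length_le a b t
    have := congrArg List.length h
    simp at this
    omega
  · simp only [myRep, if_neg hm] at h
    exact ⟨hm, (List.cons.injEq .. ▸ h).2⟩

theorem noAdj_of_fixpoints : ∀ (l : List Char),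
    myRep '(' ')' l = l → myRep '[' ']' l = l → myRep '{' '}' l = l →
    noAdj l = true := by
  intro l
  induction l using noAdj.induct with
  | case1 => intro _ _ _; rfl
  | case2 c => intro _ _ _; rfl
  | case3 c d t ih =>
    intro h1 h2 h3
    obtain ⟨n1, h1'⟩ := myRep_fix_cons _ _ _ _ _ h1
    obtain ⟨n2, h2'⟩ := myRep_fix_cons _ _ _ _ _ h2
    obtain ⟨n3, h3'⟩ := myRep_fix_cons _ _ _ _ _ h3
    have hm : matchedPair c d = false := by
      simp only [matchedPair, Bool.or_eq_false_iff, Bool.and_eq_false_iff,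
        decide_eq_false_iff_not]
      refine ⟨⟨?_, ?_⟩, ?_⟩ <;> tauto
    simp [noAdj, hm, ih h1' h2' h3']

def isOpener (c : Char) : Bool := c = '(' || c = '{' || c = '['

theorem pairsA_some_matched {c o : Char} (h : pairsA c = some o) : matchedPair o c = true := by
  simp only [pairsA] at h
  split_ifs at h with hc1 hc2 hc3
  · subst hc1; cases Option.some.inj h; decide
  · subst hc2; cases Option.some.inj h; decide
  · subst hc3; cases Option.some.inj h; decide


theorem noAdj_tail (c : Char) (rest : List Char) (h : noAdj (c :: rest) = true) :
    noAdj rest = true := by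
  cases rest <;> simp_all [noAdj]

theorem noAdj_head (c d : Char) (t : List Char) (h : noAdj (c :: d :: t) = true) :
    matchedPair c d = false := by
  simp only [noAdj, Bool.and_eq_true, Bool.not_eq_true'] at h
  exact h.1

theorem balancedA_fails (s : List Char) : ∀ st,
    (∀ c ∈ s, isBracketChar c = true) → noAdj s = true →
    (∀ o ∈ st, isOpener o = true) →
    (match s, st with | c :: _, o :: _ => ¬ (pairsA c = some o) | _, _ => True) →
    balancedA s st = true → s = [] ∧ st = [] := by
  induction s with
  | nil =>
    intro st _ _ _ _ hbal
    exact ⟨rfl, by simpa [balancedA, List.isEmpty_iff] using hbal⟩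
  | cons c t ih =>
    intro st hbr hna hop hhd hbal
    exfalso
    by_cases hop0 : isOpener c = true
    · -- c is an opener: it is pushed; recurse and derive a contradiction
      have hcond : (decide (c = '(') || decide (c = '{') || decide (c = '[')) = true := by
        simpa [isOpener] using hop0
      rw [balancedA_cons, if_pos hcond] at hbal
      cases t with
      | nil => simp [balancedA] at hbal
      | cons d t' =>
        have hhd' : ¬ (pairsA d = some c) := by
          intro heq
          have hm := pairsA_some_matched heq
          rw [noAdj_head c d t' hna] at hm
          exact Bool.false_ne_true hm
        have := ih (c :: st)
          (fun x hx => hbr x (List.mem_cons_of_mem _ hx))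
          (noAdj_tail _ _ hna)
          (fun o ho => by
            rcases List.mem_cons.mp ho with rfl | ho
            · exact hop0
            · exact hop o ho)
          hhd' hbal
        exact List.cons_ne_nil _ _ this.2
    · -- c is a closer: the head condition or the empty stack refutes hbal
      have hc6 := hbr c List.mem_cons_self
      have hdisj : ((((c = '(' ∨ c = ')') ∨ c = '[') ∨ c = ']') ∨ c = '{') ∨ c = '}' := by
        simpa [isBracketChar] using hc6
      have hps : ∃ o', pairsA c = some o' := by
        rcases hdisj with ((((rfl | rfl) | rfl) | rfl) | rfl) | rfl
        · exact absurd (by decide) hop0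
        · exact ⟨'(', rfl⟩
        · exact absurd (by decide) hop0
        · exact ⟨'[', rfl⟩
        · exact absurd (by decide) hop0
        · exact ⟨'{', rfl⟩
      obtain ⟨o', hps⟩ := hps
      have hcond : (decide (c = '(') || decide (c = '{') || decide (c = '[')) = false := by
        simpa [isOpener] using hop0
      rw [balancedA_cons, if_neg (by simp [hcond])] at hbal
      rw [hps] at hbal
      cases st with
      | nil => simp at hbal
      | cons top rest =>
        have hne : ¬ (pairsA c = some top) := hhd
        have htop : top ≠ o' := by
          intro he; exact hne (by rw [hps, he])
        dsimp only at hbal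
        rw [if_pos htop] at hbal
        exact Bool.false_ne_true hbal

theorem myRep_mem (a b : Char) (l : List Char) : ∀ c ∈ myRep a b l, c ∈ l := by
  induction l using myRep.induct a b with
  | case1 => simp [myRep]
  | case2 c => simp [myRep]
  | case3 c d t h ih =>
    simp only [myRep, if_pos h]
    intro x hx
    exact List.mem_cons_of_mem _ (List.mem_cons_of_mem _ (ih x hx))
  | case4 c d t h ih =>
    simp only [myRep, if_neg h]
    intro x hx
    rcases List.mem_cons.mp hx with rfl | hx
    · exact List.mem_cons_self
    · exact List.mem_cons_of_mem _ (ih x hx)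

theorem reduceOnce_fixpoints (s : String) (h : reduceOnce s = s) :
    myRep '(' ')' s.toList = s.toList ∧ myRep '[' ']' s.toList = s.toList ∧
      myRep '{' '}' s.toList = s.toList := by
  have hl : myRep '{' '}' (myRep '[' ']' (myRep '(' ')' s.toList)) = s.toList := by
    rw [← reduceOnce_toList, h]
  have l2 := myRep_length_le '[' ']' (myRep '(' ')' s.toList)
  have l3 := myRep_length_le '{' '}' (myRep '[' ']' (myRep '(' ')' s.toList))
  have hlen := congrArg List.length hl
  have e1 : myRep '(' ')' s.toList = s.toList := by
    rcases myRep_eq_or_length_lt '(' ')' s.toList with h1 | h1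
    · exact h1
    · exfalso; omega
  rw [e1] at hl l2 l3
  have e2 : myRep '[' ']' s.toList = s.toList := by
    rcases myRep_eq_or_length_lt '[' ']' s.toList with h2 | h2
    · exact h2
    · exfalso; rw [e1] at hlen; omega
  rw [e2] at hl
  exact ⟨e1, e2, hl⟩

theorem balancedLoop_eq (s : String) :
    (∀ c ∈ s.toList, isBracketChar c = true) → balancedLoop s = balancedA s.toList [] := by
  induction s using balancedLoop.induct with
  | case1 s t ht =>
    intro hbr
    rw [balancedLoop]
    rw [dif_pos ht]
    obtain ⟨e1, e2, e3⟩ := reduceOnce_fixpoints s ht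
    have hna := noAdj_of_fixpoints s.toList e1 e2 e3
    cases hl : s.toList with
    | nil =>
      have hs : s = "" := String.toList_inj.mp (by rw [hl]; rfl)
      subst hs
      rfl
    | cons c t' =>
      have hfalse : balancedA s.toList [] = false := by
        cases hb : balancedA s.toList [] with
        | false => rfl
        | true =>
          exfalso
          have := balancedA_fails s.toList [] hbr hna (by intro o ho; cases ho)
            (by rw [hl]; trivial) hb
          rw [hl] at this
          exact List.cons_ne_nil _ _ this.1
      rw [hl] at hfalse
      rw [hfalse]
      cases hbeq : s == "" with
      | false => rfl
      | true =>
        exfalso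
        have hse := eq_of_beq hbeq
        subst hse
        simp at hl
  | case2 s t ht ih =>
    intro hbr
    rw [balancedLoop, dif_neg ht]
    have hmem : ∀ c ∈ (reduceOnce s).toList, isBracketChar c = true := by
      intro x hx
      rw [reduceOnce_toList] at hx
      exact hbr x (myRep_mem _ _ _ x (myRep_mem _ _ _ x (myRep_mem _ _ _ x hx)))
    rw [ih hmem, reduceOnce_toList]
    rw [balancedA_myRep (Or.inr (Or.inr rfl)) _ [],
        balancedA_myRep (Or.inr (Or.inl rfl)) _ [],
        balancedA_myRep (Or.inl rfl) _ []]

theorem balanced_alt_eq (text : String) : balanced_symbols_alt text = balanced_symbols text := by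
  unfold balanced_symbols_alt balanced_symbols
  rw [balancedLoop_eq _ (by
    intro x hx
    rw [String.toList_ofList] at hx
    exact (List.mem_filter.mp hx).2)]
  rw [String.toList_ofList]
  exact balancedA_filter text.toList []

theorem build_check_foldl (files : List (String × String)) : ∀ (acc : Bool × List String),
    files.foldl (fun (acc : Bool × List String) pc =>
      if PySem.Str.endswith pc.1 ".tsx" || PySem.Str.endswith pc.1 ".jsx" ||
         PySem.Str.endswith pc.1 ".ts" || PySem.Str.endswith pc.1 ".js" then
        let acc1 := if !balanced_symbols pc.2 then (false, acc.2 ++ [pc.1 ++ ": unbalanced symbols"]) else acc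
        if PySem.Str.isIn "BROKEN_BUILD" pc.2 then (false, acc1.2 ++ [pc.1 ++ ": BROKEN_BUILD marker found"]) else acc1
      else acc) acc
    = (acc.1 && (files.flatMap (fun pc => fileNotes pc.1 pc.2)).isEmpty,
       acc.2 ++ files.flatMap (fun pc => fileNotes pc.1 pc.2)) := by
  induction files with
  | nil => intro acc; simp
  | cons pc rest ih =>
    intro acc
    rw [List.foldl_cons, ih, List.flatMap_cons]
    by_cases he : (PySem.Str.endswith pc.1 ".tsx" || PySem.Str.endswith pc.1 ".jsx" ||
        PySem.Str.endswith pc.1 ".ts" || PySem.Str.endswith pc.1 ".js") = true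
    · rw [if_pos he]
      have hfn : fileNotes pc.1 pc.2 =
          (if !balanced_symbols_alt pc.2 then [pc.1 ++ ": unbalanced symbols"] else []) ++
            (if PySem.Str.isIn "BROKEN_BUILD" pc.2 then [pc.1 ++ ": BROKEN_BUILD marker found"] else []) := by
        rw [fileNotes, if_neg (by rw [he]; simp)]
        split_ifs <;> simp
      rw [hfn, balanced_alt_eq]
      cases hb : balanced_symbols pc.2 <;> cases hbb : PySem.Str.isIn "BROKEN_BUILD" pc.2 <;>
        simp
    · have hef : (PySem.Str.endswith pc.1 ".tsx" || PySem.Str.endswith pc.1 ".jsx" ||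
          PySem.Str.endswith pc.1 ".ts" || PySem.Str.endswith pc.1 ".js") = false := by
        cases hx : (PySem.Str.endswith pc.1 ".tsx" || PySem.Str.endswith pc.1 ".jsx" ||
          PySem.Str.endswith pc.1 ".ts" || PySem.Str.endswith pc.1 ".js") <;> simp_all
      rw [if_neg he]
      rw [fileNotes, if_pos (by rw [hef]; rfl)]
      simp

-- ===== VERDICT (by name: the statement is the Claim_ definition above) =====
theorem build_check_spec : Claim_equal_build_check := by
  intro files _
  unfold Spec_build_check build_check build_check_alt
  rw [build_check_foldl]
  simp
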